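-- pv_equiv track=rewrite | github.com/BlenderRodriguez/blender.5.1.scripts | folder_script_runner_addon.py | choose_script_icon
-- ===== SOURCE A (Python) =====
-- DEFAULT_SCRIPT_ICON = "FILE_SCRIPT"
--
-- def choose_script_icon(filename):
--     lowered = filename.lower()
--     if any(token in lowered for token in ("vertex", "vert", "edge", "face")):
--         return "VERTEXSEL"
--     if any(token in lowered for token in ("mesh", "object", "snap")):
--         return "MESH_DATA"
--     if any(token in lowered for token in ("node", "geometry", "geo")):
--         return "NODETREE"
--     if any(token in lowered for token in ("material", "shader")):
--         return "MATERIAL"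
--     if any(token in lowered for token in ("camera", "render")):
--         return "RENDER_STILL"
--     if any(token in lowered for token in ("light", "studio")):
--         return "LIGHT"
--     return DEFAULT_SCRIPT_ICON
-- ===== SOURCE B (Python) =====
-- DEFAULT_SCRIPT_ICON = "FILE_SCRIPT"
--
-- _TOKEN_PRIORITY = {
--     "vertex": 0, "vert": 0, "edge": 0, "face": 0,
--     "mesh": 1, "object": 1, "snap": 1,
--     "node": 2, "geometry": 2, "geo": 2,
--     "material": 3, "shader": 3,
--     "camera": 4, "render": 4,
--     "light": 5, "studio": 5,
-- }
--
-- _ICONS = ("VERTEXSEL", "MESH_DATA", "NODETREE", "MATERIAL", "RENDER_STILL", "LIGHT")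
--
-- def choose_script_icon(filename):
--     lowered = filename.lower()
--     best = len(_ICONS)
--     for i in range(len(lowered)):
--         for token, prio in _TOKEN_PRIORITY.items():
--             if prio < best and lowered.startswith(token, i):
--                 best = prio
--     return _ICONS[best] if best < len(_ICONS) else DEFAULT_SCRIPT_ICON
-- ===== Notes on version B (the rewrite author's own statement) =====
-- stated objective: alternative
-- what changed: Instead of six cascaded any-substring-membership tests, B makes one left-to-right scan over the lowered string's positions, keeping the minimum priority of any token that starts at a scanned position (token->priority map), and finally maps that minimum priority to the icon.
import Mathlib
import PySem

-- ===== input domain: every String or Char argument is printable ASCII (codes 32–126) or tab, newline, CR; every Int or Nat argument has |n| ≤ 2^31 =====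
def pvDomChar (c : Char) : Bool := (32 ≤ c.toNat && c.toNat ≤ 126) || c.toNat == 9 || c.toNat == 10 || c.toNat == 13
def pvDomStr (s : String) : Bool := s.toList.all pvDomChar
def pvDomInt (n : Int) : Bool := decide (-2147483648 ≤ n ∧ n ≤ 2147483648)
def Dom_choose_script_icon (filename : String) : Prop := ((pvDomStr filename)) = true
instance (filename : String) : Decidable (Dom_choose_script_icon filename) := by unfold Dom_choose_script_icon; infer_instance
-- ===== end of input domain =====

-- B replaces the six cascaded any-substring tests by one positional scan keeping the minimum matched token priority (objective: alternative, same cost).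

-- ===== PORT A =====
def DEFAULT_SCRIPT_ICON : String := "FILE_SCRIPT"

def choose_script_icon (filename : String) : String :=
  let lowered := PySem.Str.lower filename
  if ["vertex", "vert", "edge", "face"].any (fun token => PySem.Str.isIn token lowered) then
    "VERTEXSEL"
  else if ["mesh", "object", "snap"].any (fun token => PySem.Str.isIn token lowered) then
    "MESH_DATA"
  else if ["node", "geometry", "geo"].any (fun token => PySem.Str.isIn token lowered) then
    "NODETREE"
  else if ["material", "shader"].any (fun token => PySem.Str.isIn token lowered) then
    "MATERIAL"
  else if ["camera", "render"].any (fun token => PySem.Str.isIn token lowered) then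
    "RENDER_STILL"
  else if ["light", "studio"].any (fun token => PySem.Str.isIn token lowered) then
    "LIGHT"
  else
    DEFAULT_SCRIPT_ICON

-- ===== PORT B =====
-- the _TOKEN_PRIORITY dict of Source B, in insertion order (all keys distinct)
def TOKEN_PRIORITY : List (List Char × Nat) :=
  [("vertex".toList, 0), ("vert".toList, 0), ("edge".toList, 0), ("face".toList, 0),
   ("mesh".toList, 1), ("object".toList, 1), ("snap".toList, 1),
   ("node".toList, 2), ("geometry".toList, 2), ("geo".toList, 2),
   ("material".toList, 3), ("shader".toList, 3),
   ("camera".toList, 4), ("render".toList, 4),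
   ("light".toList, 5), ("studio".toList, 5)]

def ICONS : List String := ["VERTEXSEL", "MESH_DATA", "NODETREE", "MATERIAL", "RENDER_STILL", "LIGHT"]

-- inner loop of Source B: fold the token→priority table, lowering `best` on a match at the current position
-- (`lowered.startswith(token, i)` is exact as isPrefixOf on the suffix starting at i, since 0 ≤ i < len)
def scanTokens (s : List Char) : List (List Char × Nat) → Nat → Nat
  | [], best => best
  | tp :: rest, best =>
      scanTokens s rest (if tp.2 < best ∧ tp.1.isPrefixOf s then tp.2 else best)

-- outer loop of Source B: i = 0 .. len-1, realised as recursion over the suffixes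
def scanBest : List Char → Nat → Nat
  | [], best => best
  | c :: rest, best => scanBest rest (scanTokens (c :: rest) TOKEN_PRIORITY best)

def choose_script_icon_alt (filename : String) : String :=
  let lowered := (PySem.Str.lower filename).toList
  let best := scanBest lowered ICONS.length
  if best < ICONS.length then ICONS.getD best DEFAULT_SCRIPT_ICON else DEFAULT_SCRIPT_ICON

-- ===== PRECONDITION & SPEC =====
def Spec_choose_script_icon (filename : String) (out : String) : Prop := out = choose_script_icon_alt filename
instance (filename : String) (out : String) : Decidable (Spec_choose_script_icon filename out) := by unfold Spec_choose_script_icon; infer_instance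

-- ===== CLAIM (what is proved, stated in full; the proofs are below) =====
def Claim_equal_choose_script_icon : Prop := ∀ (filename : String), Dom_choose_script_icon filename → Spec_choose_script_icon filename (choose_script_icon filename)

-- ===== LEMMAS AND PROOFS =====

theorem scanTokens_le (s : List Char) (L : List (List Char × Nat)) (b : Nat) :
    scanTokens s L b ≤ b := by
  induction L generalizing b with
  | nil => simp [scanTokens]
  | cons tp rest ih =>
    simp only [scanTokens]
    split
    · exact le_trans (ih _) (by omega)
    · exact ih _

theorem scanTokens_le_of_mem (s : List Char) (L : List (List Char × Nat)) (b : Nat)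
    (t : List Char) (p : Nat) (hmem : (t, p) ∈ L) (hpre : t.isPrefixOf s) :
    scanTokens s L b ≤ p := by
  induction L generalizing b with
  | nil => simp at hmem
  | cons tp rest ih =>
    simp only [scanTokens]
    rcases List.mem_cons.mp hmem with h | h
    · subst h
      split
      · exact scanTokens_le _ _ _
      · rename_i hcond
        simp only [hpre, and_true] at hcond
        exact le_trans (scanTokens_le _ _ _) (by omega)
    · exact ih _ h

theorem scanTokens_cases (s : List Char) (L : List (List Char × Nat)) (b : Nat) :
    scanTokens s L b = b ∨ ∃ tp ∈ L, scanTokens s L b = tp.2 ∧ tp.1.isPrefixOf s := by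
  induction L generalizing b with
  | nil => left; simp [scanTokens]
  | cons tp rest ih =>
    simp only [scanTokens]
    split
    · rename_i hcond
      rcases ih tp.2 with h | ⟨tq, hq, hv, hpre⟩
      · right; exact ⟨tp, by simp, h, hcond.2⟩
      · right; exact ⟨tq, by simp [hq], hv, hpre⟩
    · rcases ih b with h | ⟨tq, hq, hv, hpre⟩
      · left; exact h
      · right; exact ⟨tq, by simp [hq], hv, hpre⟩

theorem scanBest_le (s : List Char) (b : Nat) : scanBest s b ≤ b := by
  induction s generalizing b with
  | nil => simp [scanBest]
  | cons c rest ih =>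
    exact le_trans (ih _) (scanTokens_le _ _ _)

theorem scanBest_le_of_match (s : List Char) (b : Nat) (t : List Char) (p : Nat)
    (hmem : (t, p) ∈ TOKEN_PRIORITY) (hne : t ≠ []) (j : Nat) (hpre : t <+: s.drop j) :
    scanBest s b ≤ p := by
  induction s generalizing b j with
  | nil =>
    simp [List.drop_nil] at hpre
    exact absurd hpre hne
  | cons c rest ih =>
    simp only [scanBest]
    cases j with
    | zero =>
      simp only [List.drop_zero] at hpre
      exact le_trans (scanBest_le _ _)
        (scanTokens_le_of_mem _ _ _ t p hmem (List.isPrefixOf_iff_prefix.mpr hpre))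
    | succ j' =>
      simp only [List.drop_succ_cons] at hpre
      exact ih _ j' hpre

theorem scanBest_cases (s : List Char) (b : Nat) :
    scanBest s b = b ∨ ∃ tp ∈ TOKEN_PRIORITY, scanBest s b = tp.2 ∧ ∃ j, tp.1 <+: s.drop j := by
  induction s generalizing b with
  | nil => left; simp [scanBest]
  | cons c rest ih =>
    simp only [scanBest]
    rcases ih (scanTokens (c :: rest) TOKEN_PRIORITY b) with h | ⟨tp, hmem, hv, j, hpre⟩
    · rcases scanTokens_cases (c :: rest) TOKEN_PRIORITY b with h2 | ⟨tp, hmem, hv, hpre⟩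
      · left; omega
      · right
        exact ⟨tp, hmem, by omega, 0, by simpa using List.isPrefixOf_iff_prefix.mp hpre⟩
    · right
      exact ⟨tp, hmem, hv, j + 1, by simpa using hpre⟩

-- occurrence as a substring ↔ prefix of some suffix
theorem occ_isIn (t s : List Char) :
    (∃ j, t <+: s.drop j) ↔ PySem.Chars.isIn t s = true :=
  PySem.Chars.exists_prefix_drop_iff_isIn _ _

-- the scan's lower bound: if every priority below g belongs to a non-occurring token, best ≥ g
theorem best_ge (s : List Char) (g : Nat) (hg : g ≤ 6)
    (h : ∀ t p, (t, p) ∈ TOKEN_PRIORITY → p < g → PySem.Chars.isIn t s = false) :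
    g ≤ scanBest s 6 := by
  rcases scanBest_cases s 6 with h6 | ⟨tp, hmem, hv, j, hpre⟩
  · omega
  · by_contra hlt
    have hoc : PySem.Chars.isIn tp.1 s = true := (occ_isIn _ _).mp ⟨j, hpre⟩
    have := h tp.1 tp.2 hmem (by omega)
    simp [this] at hoc

theorem best_eq (s : List Char) (g : Nat) (hg : g ≤ 6)
    (hle : scanBest s 6 ≤ g)
    (h : ∀ t p, (t, p) ∈ TOKEN_PRIORITY → p < g → PySem.Chars.isIn t s = false) :
    scanBest s 6 = g :=
  le_antisymm hle (best_ge s g hg h)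

-- scan reaches any occurring token's priority
theorem best_le_of_isIn (s t : List Char) (p : Nat)
    (hmem : (t, p) ∈ TOKEN_PRIORITY) (hne : t ≠ [])
    (hoc : PySem.Chars.isIn t s = true) : scanBest s 6 ≤ p := by
  rcases (occ_isIn t s).mpr hoc with ⟨j, hpre⟩
  exact scanBest_le_of_match s 6 t p hmem hne j hpre

-- ===== VERDICT (by name: the statement is the Claim_ definition above) =====
theorem choose_script_icon_spec : Claim_equal_choose_script_icon := by
  intro filename _
  unfold Spec_choose_script_icon choose_script_icon choose_script_icon_alt
  simp only [PySem.Str.isIn_eq, List.any_cons, List.any_nil, Bool.or_eq_true, ICONS]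
  set s := (PySem.Str.lower filename).toList with hs
  have hlen : (["VERTEXSEL", "MESH_DATA", "NODETREE", "MATERIAL", "RENDER_STILL", "LIGHT"] : List String).length = 6 := rfl
  rw [hlen]
  by_cases h0 : PySem.Chars.isIn "vertex".toList s = true ∨ PySem.Chars.isIn "vert".toList s = true ∨ PySem.Chars.isIn "edge".toList s = true ∨ PySem.Chars.isIn "face".toList s = true ∨ false = true
  · have hle : scanBest s 6 ≤ 0 := by
      rcases h0 with h|h|h|h|h
      · exact best_le_of_isIn s _ 0 (by decide) (by decide) h
      · exact best_le_of_isIn s _ 0 (by decide) (by decide) h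
      · exact best_le_of_isIn s _ 0 (by decide) (by decide) h
      · exact best_le_of_isIn s _ 0 (by decide) (by decide) h
      · exact absurd h (by decide)
    have hbest : scanBest s 6 = 0 := Nat.le_zero.mp hle
    rw [if_pos h0]
    simp [hbest]
  · simp only [not_or, Bool.not_eq_true] at h0
    obtain ⟨f_vertex, f_vert, f_edge, f_face, -⟩ := h0
    by_cases h1 : PySem.Chars.isIn "mesh".toList s = true ∨ PySem.Chars.isIn "object".toList s = true ∨ PySem.Chars.isIn "snap".toList s = true ∨ false = true
    · have hle : scanBest s 6 ≤ 1 := by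
        rcases h1 with h|h|h|h
        · exact best_le_of_isIn s _ 1 (by decide) (by decide) h
        · exact best_le_of_isIn s _ 1 (by decide) (by decide) h
        · exact best_le_of_isIn s _ 1 (by decide) (by decide) h
        · exact absurd h (by decide)
      have hno : ∀ t p, (t, p) ∈ TOKEN_PRIORITY → p < 1 → PySem.Chars.isIn t s = false := by
        intro t p hmem hlt
        simp only [TOKEN_PRIORITY, List.mem_cons, List.not_mem_nil, or_false, Prod.mk.injEq] at hmem
        rcases hmem with ⟨rfl, rfl⟩|⟨rfl, rfl⟩|⟨rfl, rfl⟩|⟨rfl, rfl⟩|⟨rfl, rfl⟩|⟨rfl, rfl⟩|⟨rfl, rfl⟩|⟨rfl, rfl⟩|⟨rfl, rfl⟩|⟨rfl, rfl⟩|⟨rfl, rfl⟩|⟨rfl, rfl⟩|⟨rfl, rfl⟩|⟨rfl, rfl⟩|⟨rfl, rfl⟩|⟨rfl, rfl⟩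
        all_goals first | omega | exact f_vertex | exact f_vert | exact f_edge | exact f_face
      have hbest : scanBest s 6 = 1 := best_eq s 1 (by omega) hle hno
      rw [if_neg (by simp; exact ⟨f_vertex, f_vert, f_edge, f_face⟩), if_pos h1]
      simp [hbest]
    · simp only [not_or, Bool.not_eq_true] at h1
      obtain ⟨f_mesh, f_object, f_snap, -⟩ := h1
      by_cases h2 : PySem.Chars.isIn "node".toList s = true ∨ PySem.Chars.isIn "geometry".toList s = true ∨ PySem.Chars.isIn "geo".toList s = true ∨ false = true
      · have hle : scanBest s 6 ≤ 2 := by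
          rcases h2 with h|h|h|h
          · exact best_le_of_isIn s _ 2 (by decide) (by decide) h
          · exact best_le_of_isIn s _ 2 (by decide) (by decide) h
          · exact best_le_of_isIn s _ 2 (by decide) (by decide) h
          · exact absurd h (by decide)
        have hno : ∀ t p, (t, p) ∈ TOKEN_PRIORITY → p < 2 → PySem.Chars.isIn t s = false := by
          intro t p hmem hlt
          simp only [TOKEN_PRIORITY, List.mem_cons, List.not_mem_nil, or_false, Prod.mk.injEq] at hmem
          rcases hmem with ⟨rfl, rfl⟩|⟨rfl, rfl⟩|⟨rfl, rfl⟩|⟨rfl, rfl⟩|⟨rfl, rfl⟩|⟨rfl, rfl⟩|⟨rfl, rfl⟩|⟨rfl, rfl⟩|⟨rfl, rfl⟩|⟨rfl, rfl⟩|⟨rfl, rfl⟩|⟨rfl, rfl⟩|⟨rfl, rfl⟩|⟨rfl, rfl⟩|⟨rfl, rfl⟩|⟨rfl, rfl⟩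
          all_goals first | omega | exact f_vertex | exact f_vert | exact f_edge | exact f_face | exact f_mesh | exact f_object | exact f_snap
        have hbest : scanBest s 6 = 2 := best_eq s 2 (by omega) hle hno
        rw [if_neg (by simp; exact ⟨f_vertex, f_vert, f_edge, f_face⟩), if_neg (by simp; exact ⟨f_mesh, f_object, f_snap⟩), if_pos h2]
        simp [hbest]
      · simp only [not_or, Bool.not_eq_true] at h2
        obtain ⟨f_node, f_geometry, f_geo, -⟩ := h2
        by_cases h3 : PySem.Chars.isIn "material".toList s = true ∨ PySem.Chars.isIn "shader".toList s = true ∨ false = true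
        · have hle : scanBest s 6 ≤ 3 := by
            rcases h3 with h|h|h
            · exact best_le_of_isIn s _ 3 (by decide) (by decide) h
            · exact best_le_of_isIn s _ 3 (by decide) (by decide) h
            · exact absurd h (by decide)
          have hno : ∀ t p, (t, p) ∈ TOKEN_PRIORITY → p < 3 → PySem.Chars.isIn t s = false := by
            intro t p hmem hlt
            simp only [TOKEN_PRIORITY, List.mem_cons, List.not_mem_nil, or_false, Prod.mk.injEq] at hmem
            rcases hmem with ⟨rfl, rfl⟩|⟨rfl, rfl⟩|⟨rfl, rfl⟩|⟨rfl, rfl⟩|⟨rfl, rfl⟩|⟨rfl, rfl⟩|⟨rfl, rfl⟩|⟨rfl, rfl⟩|⟨rfl, rfl⟩|⟨rfl, rfl⟩|⟨rfl, rfl⟩|⟨rfl, rfl⟩|⟨rfl, rfl⟩|⟨rfl, rfl⟩|⟨rfl, rfl⟩|⟨rfl, rfl⟩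
            all_goals first | omega | exact f_vertex | exact f_vert | exact f_edge | exact f_face | exact f_mesh | exact f_object | exact f_snap | exact f_node | exact f_geometry | exact f_geo
          have hbest : scanBest s 6 = 3 := best_eq s 3 (by omega) hle hno
          rw [if_neg (by simp; exact ⟨f_vertex, f_vert, f_edge, f_face⟩), if_neg (by simp; exact ⟨f_mesh, f_object, f_snap⟩), if_neg (by simp; exact ⟨f_node, f_geometry, f_geo⟩), if_pos h3]
          simp [hbest]
        · simp only [not_or, Bool.not_eq_true] at h3
          obtain ⟨f_material, f_shader, -⟩ := h3
          by_cases h4 : PySem.Chars.isIn "camera".toList s = true ∨ PySem.Chars.isIn "render".toList s = true ∨ false = true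
          · have hle : scanBest s 6 ≤ 4 := by
              rcases h4 with h|h|h
              · exact best_le_of_isIn s _ 4 (by decide) (by decide) h
              · exact best_le_of_isIn s _ 4 (by decide) (by decide) h
              · exact absurd h (by decide)
            have hno : ∀ t p, (t, p) ∈ TOKEN_PRIORITY → p < 4 → PySem.Chars.isIn t s = false := by
              intro t p hmem hlt
              simp only [TOKEN_PRIORITY, List.mem_cons, List.not_mem_nil, or_false, Prod.mk.injEq] at hmem
              rcases hmem with ⟨rfl, rfl⟩|⟨rfl, rfl⟩|⟨rfl, rfl⟩|⟨rfl, rfl⟩|⟨rfl, rfl⟩|⟨rfl, rfl⟩|⟨rfl, rfl⟩|⟨rfl, rfl⟩|⟨rfl, rfl⟩|⟨rfl, rfl⟩|⟨rfl, rfl⟩|⟨rfl, rfl⟩|⟨rfl, rfl⟩|⟨rfl, rfl⟩|⟨rfl, rfl⟩|⟨rfl, rfl⟩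
              all_goals first | omega | exact f_vertex | exact f_vert | exact f_edge | exact f_face | exact f_mesh | exact f_object | exact f_snap | exact f_node | exact f_geometry | exact f_geo | exact f_material | exact f_shader
            have hbest : scanBest s 6 = 4 := best_eq s 4 (by omega) hle hno
            rw [if_neg (by simp; exact ⟨f_vertex, f_vert, f_edge, f_face⟩), if_neg (by simp; exact ⟨f_mesh, f_object, f_snap⟩), if_neg (by simp; exact ⟨f_node, f_geometry, f_geo⟩), if_neg (by simp; exact ⟨f_material, f_shader⟩), if_pos h4]
            simp [hbest]
          · simp only [not_or, Bool.not_eq_true] at h4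
            obtain ⟨f_camera, f_render, -⟩ := h4
            by_cases h5 : PySem.Chars.isIn "light".toList s = true ∨ PySem.Chars.isIn "studio".toList s = true ∨ false = true
            · have hle : scanBest s 6 ≤ 5 := by
                rcases h5 with h|h|h
                · exact best_le_of_isIn s _ 5 (by decide) (by decide) h
                · exact best_le_of_isIn s _ 5 (by decide) (by decide) h
                · exact absurd h (by decide)
              have hno : ∀ t p, (t, p) ∈ TOKEN_PRIORITY → p < 5 → PySem.Chars.isIn t s = false := by
                intro t p hmem hlt
                simp only [TOKEN_PRIORITY, List.mem_cons, List.not_mem_nil, or_false, Prod.mk.injEq] at hmem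
                rcases hmem with ⟨rfl, rfl⟩|⟨rfl, rfl⟩|⟨rfl, rfl⟩|⟨rfl, rfl⟩|⟨rfl, rfl⟩|⟨rfl, rfl⟩|⟨rfl, rfl⟩|⟨rfl, rfl⟩|⟨rfl, rfl⟩|⟨rfl, rfl⟩|⟨rfl, rfl⟩|⟨rfl, rfl⟩|⟨rfl, rfl⟩|⟨rfl, rfl⟩|⟨rfl, rfl⟩|⟨rfl, rfl⟩
                all_goals first | omega | exact f_vertex | exact f_vert | exact f_edge | exact f_face | exact f_mesh | exact f_object | exact f_snap | exact f_node | exact f_geometry | exact f_geo | exact f_material | exact f_shader | exact f_camera | exact f_render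
              have hbest : scanBest s 6 = 5 := best_eq s 5 (by omega) hle hno
              rw [if_neg (by simp; exact ⟨f_vertex, f_vert, f_edge, f_face⟩), if_neg (by simp; exact ⟨f_mesh, f_object, f_snap⟩), if_neg (by simp; exact ⟨f_node, f_geometry, f_geo⟩), if_neg (by simp; exact ⟨f_material, f_shader⟩), if_neg (by simp; exact ⟨f_camera, f_render⟩), if_pos h5]
              simp [hbest]
            · simp only [not_or, Bool.not_eq_true] at h5
              obtain ⟨f_light, f_studio, -⟩ := h5
              have hno : ∀ t p, (t, p) ∈ TOKEN_PRIORITY → p < 6 → PySem.Chars.isIn t s = false := by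
                intro t p hmem hlt
                simp only [TOKEN_PRIORITY, List.mem_cons, List.not_mem_nil, or_false, Prod.mk.injEq] at hmem
                rcases hmem with ⟨rfl, rfl⟩|⟨rfl, rfl⟩|⟨rfl, rfl⟩|⟨rfl, rfl⟩|⟨rfl, rfl⟩|⟨rfl, rfl⟩|⟨rfl, rfl⟩|⟨rfl, rfl⟩|⟨rfl, rfl⟩|⟨rfl, rfl⟩|⟨rfl, rfl⟩|⟨rfl, rfl⟩|⟨rfl, rfl⟩|⟨rfl, rfl⟩|⟨rfl, rfl⟩|⟨rfl, rfl⟩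
                all_goals first | omega | exact f_vertex | exact f_vert | exact f_edge | exact f_face | exact f_mesh | exact f_object | exact f_snap | exact f_node | exact f_geometry | exact f_geo | exact f_material | exact f_shader | exact f_camera | exact f_render | exact f_light | exact f_studio
              have hbest : scanBest s 6 = 6 := best_eq s 6 (le_refl 6) (scanBest_le s 6) hno
              rw [if_neg (by simp; exact ⟨f_vertex, f_vert, f_edge, f_face⟩), if_neg (by simp; exact ⟨f_mesh, f_object, f_snap⟩), if_neg (by simp; exact ⟨f_node, f_geometry, f_geo⟩), if_neg (by simp; exact ⟨f_material, f_shader⟩), if_neg (by simp; exact ⟨f_camera, f_render⟩), if_neg (by simp; exact ⟨f_light, f_studio⟩)]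
              simp [hbest]
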